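-- pv_equiv track=rewrite | github.com/allan-tulane/sp24-assignment-03-seanzero7 | main.py | fast_MED
-- ===== SOURCE A (Python) =====
-- def MED(S, T):
--     # TO DO - modify to account for insertions, deletions and substitutions
--     if (S == ""):
--         return(len(T))
--     elif (T == ""):
--         return(len(S))
--     else:
--         if (S[0] == T[0]):
--             return(MED(S[1:], T[1:]))
--         else:
--             return(1 + min(MED(S, T[1:]), MED(S[1:], T)))
--
-- def fast_MED(S, T, MED={}):
--   if (S, T) in MED:
--     return MED[(S, T)]
--
--   # Base cases
--   if S == "":
--     return len(T)
--   if T == "":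
--     return len(S)
--
--   # Recursive cases
--   if S[0] == T[0]:
--     result = fast_MED(S[1:], T[1:], MED)
--   else:
--     result = 1 + min(fast_MED(S, T[1:], MED), fast_MED(S[1:], T, MED))
--
--   # Save in dict before returning
--   MED[(S, T)] = result
--   return result
-- ===== SOURCE B (Python) =====
-- def fast_MED(S, T, MED={}):
--     # Iterative bottom-up DP over suffix indices (one row kept), O(n*m).
--     n, m = len(S), len(T)
--     row = [m - j for j in range(m + 1)]          # distances of ("" vs T[j:])
--     for i in range(n - 1, -1, -1):
--         new = [0] * (m + 1)
--         new[m] = n - i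
--         for j in range(m - 1, -1, -1):
--             new[j] = row[j + 1] if S[i] == T[j] else 1 + min(new[j + 1], row[j])
--         row = new
--     return row[0]
-- ===== Notes on version B (the rewrite author's own statement) =====
-- stated objective: faster
-- what changed: Replaced the substring-keyed memoized recursion by an iterative bottom-up DP over suffix indices keeping a single row, removing recursion, string slicing and the dict entirely.
import Mathlib
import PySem

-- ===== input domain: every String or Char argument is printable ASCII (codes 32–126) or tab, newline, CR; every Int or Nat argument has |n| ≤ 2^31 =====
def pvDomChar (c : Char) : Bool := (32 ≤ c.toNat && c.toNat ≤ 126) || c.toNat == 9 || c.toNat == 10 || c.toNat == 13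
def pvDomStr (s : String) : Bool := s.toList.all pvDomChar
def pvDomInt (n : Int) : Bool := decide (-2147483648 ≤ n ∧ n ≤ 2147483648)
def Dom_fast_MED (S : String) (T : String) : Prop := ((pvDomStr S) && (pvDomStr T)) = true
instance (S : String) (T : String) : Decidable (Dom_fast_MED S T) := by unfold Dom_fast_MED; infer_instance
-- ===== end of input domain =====

-- B replaces A's substring-keyed memoized recursion by an iterative bottom-up DP
-- over suffix indices keeping a single row (objective: faster; A's default-arg memo
-- dict is a cache that never changes the returned value, so it is not modelled).

-- ===== PORT A =====
-- A's recursion on the first characters; the memo dict only caches already-correct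
-- results, so the returned value is this plain recursion (exact on all inputs).
def fastMEDRec : List Char → List Char → Int
  | [], t => (t.length : Int)                       -- if S == "": return len(T)
  | a :: s, [] => ((a :: s).length : Int)           -- if T == "": return len(S)
  | a :: s, b :: t =>
      if a == b then fastMEDRec s t                 -- S[0] == T[0]
      else 1 + min (fastMEDRec (a :: s) t) (fastMEDRec s (b :: t))
  termination_by s t => s.length + t.length
  decreasing_by all_goals simp <;> omega

def fast_MED (S : String) (T : String) : Int := fastMEDRec S.toList T.toList

-- ===== PORT B =====
-- One inner-loop pass: given S[i] (=c), the T-suffix at j, and the previous row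
-- (dp for S[i+1:]), build the new row back-to-front, exactly Source B's j-descending loop.
def fastMEDStep (c : Char) : List Char → List Int → List Int
  | [], p :: _ => [p + 1]                           -- new[m] = n - i = row[m] + 1
  | d :: ts, p :: prest =>
      let rest := fastMEDStep c ts prest
      (if c == d then prest.headI else 1 + min rest.headI p) :: rest
  | _, [] => []                                     -- unreachable: rows are nonempty

-- the base row [m, m-1, ..., 0] for S exhausted
def fastMEDBase : List Char → List Int
  | [] => [0]
  | _ :: ts => ((ts.length : Int) + 1) :: fastMEDBase ts

-- rows built from the base upwards, one fastMEDStep per character of S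
def fastMEDRow : List Char → List Char → List Int
  | [], t => fastMEDBase t
  | c :: ss, t => fastMEDStep c t (fastMEDRow ss t)

def fast_MED_alt (S : String) (T : String) : Int := (fastMEDRow S.toList T.toList).headI

-- ===== PRECONDITION & SPEC =====
def Spec_fast_MED (S : String) (T : String) (out : Int) : Prop := out = fast_MED_alt S T
instance (S : String) (T : String) (out : Int) : Decidable (Spec_fast_MED S T out) := by unfold Spec_fast_MED; infer_instance

-- ===== CLAIM (what is proved, stated in full; the proofs are below) =====
def Claim_equal_fast_MED : Prop := ∀ (S : String) (T : String), Dom_fast_MED S T → Spec_fast_MED S T (fast_MED S T)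

-- ===== LEMMAS AND PROOFS =====

theorem fastMEDRec_nil (s : List Char) : fastMEDRec s [] = (s.length : Int) := by
  cases s <;> simp [fastMEDRec]

theorem fastMEDBase_eq (t : List Char) :
    fastMEDBase t = (List.tails t).map (fun u => fastMEDRec [] u) := by
  induction t with
  | nil => simp [fastMEDBase, fastMEDRec]
  | cons d ts ih => simp [fastMEDBase, fastMEDRec, ih]

theorem fastMEDStep_eq (c : Char) (ss : List Char) (t : List Char) :
    fastMEDStep c t ((List.tails t).map (fun u => fastMEDRec ss u)) =
      (List.tails t).map (fun u => fastMEDRec (c :: ss) u) := by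
  induction t with
  | nil =>
      simp [fastMEDStep, fastMEDRec_nil]
  | cons d ts ih =>
      have hts : (List.tails ts).headI = ts := by cases ts <;> simp
      have hhead : ((List.tails ts).map (fun u => fastMEDRec ss u)).headI
          = fastMEDRec ss ts := by
        cases ts <;> simp
      have hhead' : ((List.tails ts).map (fun u => fastMEDRec (c :: ss) u)).headI
          = fastMEDRec (c :: ss) ts := by
        cases ts <;> simp
      simp only [List.tails, List.map, fastMEDStep, ih, hhead, hhead']
      by_cases h : c = d
      · simp [h, fastMEDRec]
      · simp [h, fastMEDRec]

theorem fastMEDRow_eq (s t : List Char) :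
    fastMEDRow s t = (List.tails t).map (fun u => fastMEDRec s u) := by
  induction s with
  | nil => simpa [fastMEDRow] using fastMEDBase_eq t
  | cons c ss ih => simp [fastMEDRow, ih, fastMEDStep_eq]

theorem fastMEDRow_headI (s t : List Char) : (fastMEDRow s t).headI = fastMEDRec s t := by
  rw [fastMEDRow_eq]
  cases t <;> simp

-- ===== VERDICT (by name: the statement is the Claim_ definition above) =====
theorem fast_MED_spec : Claim_equal_fast_MED := by
  intro S T _
  unfold Spec_fast_MED fast_MED fast_MED_alt
  exact (fastMEDRow_headI S.toList T.toList).symm
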